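-- pv_equiv track=rewrite | github.com/azirale/euler | primefactors.py | cancel_common_factors
-- ===== SOURCE A (Python) =====
-- from typing import List, Dict, Tuple
--
-- def cancel_common_factors(a_prime_factors: List[int], b_prime_factors: List[int]) -> Tuple[List[int], List[int]]:
--     a_index, b_index = 0, 0
--     a_prime_factors.sort()
--     b_prime_factors.sort()
--     new_a = []
--     new_b = []
--     while a_index < len(a_prime_factors) and b_index < len(b_prime_factors):
--         # cancelled
--         if a_prime_factors[a_index] == b_prime_factors[b_index]:
--             a_index += 1
--             b_index += 1
--             continue
--         # if a>b then add b and advance b track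
--         if a_prime_factors[a_index] > b_prime_factors[b_index]:
--             new_b.append(b_prime_factors[b_index])
--             b_index += 1
--             continue
--         # if a<b then add a and advance a track
--         if a_prime_factors[a_index] < b_prime_factors[b_index]:
--             new_a.append(a_prime_factors[a_index])
--             a_index += 1
--             continue
--     # extend anything that was skipped because other finished first
--     new_a.extend(a_prime_factors[a_index:])
--     new_b.extend(b_prime_factors[b_index:])
--     return new_a, new_b
-- ===== SOURCE B (Python) =====
-- def _counts(xs):
--     c = {}
--     for x in xs:
--         c[x] = c.get(x, 0) + 1
--     return c
--
-- def _residual(xs, other_counts):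
--     # xs is sorted, so the survivors come out in sorted order
--     remaining = dict(other_counts)
--     out = []
--     for x in xs:
--         if remaining.get(x, 0) > 0:
--             remaining[x] = remaining[x] - 1
--         else:
--             out.append(x)
--     return out
--
-- def cancel_common_factors(a_prime_factors, b_prime_factors):
--     # Same return value as the two-pointer merge, via count dictionaries:
--     # each side keeps every occurrence beyond the other side's count.
--     # (Keeps A's in-place sorts, so the argument mutation is identical.)
--     a_prime_factors.sort()
--     b_prime_factors.sort()
--     return (_residual(a_prime_factors, _counts(b_prime_factors)),
--             _residual(b_prime_factors, _counts(a_prime_factors)))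
-- ===== Notes on version B (the rewrite author's own statement) =====
-- stated objective: alternative
-- what changed: Replaces the index-based two-pointer merge with count dictionaries: build a counter for each list, then one pass over each sorted list keeps every occurrence beyond the other list's remaining count, so the synchronized index walk and its three-way comparison disappear.
import Mathlib
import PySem

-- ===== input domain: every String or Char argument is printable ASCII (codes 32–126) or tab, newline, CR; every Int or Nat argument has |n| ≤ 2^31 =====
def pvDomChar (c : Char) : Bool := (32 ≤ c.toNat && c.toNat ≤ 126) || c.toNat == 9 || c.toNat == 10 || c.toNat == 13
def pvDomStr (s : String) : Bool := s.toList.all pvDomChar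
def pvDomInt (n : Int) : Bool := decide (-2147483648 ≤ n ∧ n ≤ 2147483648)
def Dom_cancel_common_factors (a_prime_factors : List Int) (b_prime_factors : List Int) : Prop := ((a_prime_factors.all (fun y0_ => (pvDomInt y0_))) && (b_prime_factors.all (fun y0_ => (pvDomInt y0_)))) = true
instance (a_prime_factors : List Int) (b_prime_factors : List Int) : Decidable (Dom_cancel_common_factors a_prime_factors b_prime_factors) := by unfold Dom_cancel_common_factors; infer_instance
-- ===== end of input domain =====

-- B replaces A's two-pointer index merge by count dictionaries: one pass over each sorted
-- list keeps every occurrence beyond the other list's remaining count (alternative algorithm,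
-- same cost). Both A and B sort the argument lists in place; the equivalence proved here is
-- about the return value.


-- ===== PORT A =====
-- the while loop: indices into the (sorted) lists; the guard certifies both indices in range,
-- so the Python subscripts are exact `getElem`s here
def cancelLoop (la lb : List Int) (ai bi : Nat) (na nb : List Int) : List Int × List Int :=
  if h : ai < la.length ∧ bi < lb.length then
    if la[ai]'h.1 = lb[bi]'h.2 then
      cancelLoop la lb (ai+1) (bi+1) na nb
    else if la[ai]'h.1 > lb[bi]'h.2 then
      cancelLoop la lb ai (bi+1) na (nb ++ [lb[bi]'h.2])
    else
      cancelLoop la lb (ai+1) bi (na ++ [la[ai]'h.1]) nb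
  else
    (na ++ la.drop ai, nb ++ lb.drop bi)
termination_by (la.length - ai) + (lb.length - bi)
decreasing_by all_goals omega

def cancel_common_factors (a_prime_factors : List Int) (b_prime_factors : List Int) : List Int × List Int :=
  let la := PySem.List.sorted a_prime_factors (fun x => x)
  let lb := PySem.List.sorted b_prime_factors (fun x => x)
  cancelLoop la lb 0 0 [] []

-- ===== PORT B =====
-- `_counts(xs)` (`c[x] = c.get(x, 0) + 1` over a fresh dict) is PySem.Dict.counter.
-- `_residual(xs, other_counts)`: the for loop over xs with the mutable dict `remaining`
-- (the branch guard `remaining.get(x, 0) > 0` certifies x is a key, so `remaining[x] - 1`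
-- is `getD x 0 - 1`, and the item assignment is Dict.insert) and the growing `out` list
def residualGo (remaining : PySem.Dict Int Int) (xs : List Int) (out : List Int) : List Int :=
  match xs with
  | [] => out
  | x :: t =>
    if remaining.getD x 0 > 0 then
      residualGo (remaining.insert x (remaining.getD x 0 - 1)) t out
    else
      residualGo remaining t (out ++ [x])

def cancel_common_factors_alt (a_prime_factors : List Int) (b_prime_factors : List Int) : List Int × List Int :=
  let la := PySem.List.sorted a_prime_factors (fun x => x)
  let lb := PySem.List.sorted b_prime_factors (fun x => x)
  (residualGo (PySem.Dict.counter lb) la [], residualGo (PySem.Dict.counter la) lb [])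

-- ===== PRECONDITION & SPEC =====
def Spec_cancel_common_factors (a_prime_factors : List Int) (b_prime_factors : List Int) (out : List Int × List Int) : Prop := out = cancel_common_factors_alt a_prime_factors b_prime_factors
instance (a_prime_factors : List Int) (b_prime_factors : List Int) (out : List Int × List Int) : Decidable (Spec_cancel_common_factors a_prime_factors b_prime_factors out) := by unfold Spec_cancel_common_factors; infer_instance

-- ===== CLAIM (what is proved, stated in full; the proofs are below) =====
def Claim_equal_cancel_common_factors : Prop := ∀ (a_prime_factors : List Int) (b_prime_factors : List Int), Dom_cancel_common_factors a_prime_factors b_prime_factors → Spec_cancel_common_factors a_prime_factors b_prime_factors (cancel_common_factors a_prime_factors b_prime_factors)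

-- ===== LEMMAS AND PROOFS =====

-- B's residual pass, with any dict holding lb's counts, is List.diff
theorem residualGo_diff (la : List Int) :
    ∀ (lb : List Int) (d : PySem.Dict Int Int) (out : List Int),
      (∀ v, d.getD v 0 = (lb.count v : Int)) →
      residualGo d la out = out ++ la.diff lb := by
  induction la with
  | nil => intro lb d out _; simp [residualGo]
  | cons x t ih =>
    intro lb d out hd
    rw [residualGo]
    by_cases hx : d.getD x 0 > 0
    · rw [if_pos hx]
      have hmem : x ∈ lb := by
        rw [← List.count_pos_iff]; have := hd x; omega
      have hcnt : 1 ≤ lb.count x := List.count_pos_iff.mpr hmem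
      rw [ih (lb.erase x) _ out ?_, List.cons_diff_of_mem hmem]
      intro v
      rw [PySem.Dict.getD_insert, hd v]
      by_cases hv : v = x
      · subst hv
        rw [if_pos rfl, hd v, List.count_erase_self]
        push_cast [hcnt]; ring
      · rw [if_neg hv, List.count_erase_of_ne hv]
    · rw [if_neg hx]
      have hnm : x ∉ lb := by
        rw [← List.count_eq_zero]; have := hd x; omega
      rw [ih lb d (out ++ [x]) hd, List.cons_diff_of_not_mem hnm,
          List.append_assoc, List.singleton_append]

-- a value below the head of a ≤-sorted suffix is not in the suffix
theorem not_mem_of_lt_head {l : List Int} {i : Nat} {y : Int}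
    (hp : l.Pairwise (· ≤ ·)) (hi : i < l.length) (hy : y < l[i]) :
    y ∉ l.drop i := by
  rw [List.drop_eq_getElem_cons hi]
  have hp' : (l.drop i).Pairwise (· ≤ ·) := hp.drop
  rw [List.drop_eq_getElem_cons hi, List.pairwise_cons] at hp'
  intro hmem
  rcases List.mem_cons.mp hmem with h | h
  · omega
  · have := hp'.1 y h; omega

-- the merge loop on ≤-sorted lists computes the pair of multiset differences
theorem cancelLoop_diff (la lb : List Int) (ai bi : Nat) (na nb : List Int)
    (ha : la.Pairwise (· ≤ ·)) (hb : lb.Pairwise (· ≤ ·)) :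
    cancelLoop la lb ai bi na nb =
      (na ++ (la.drop ai).diff (lb.drop bi), nb ++ (lb.drop bi).diff (la.drop ai)) := by
  induction ai, bi, na, nb using cancelLoop.induct (la := la) (lb := lb) with
  | case1 ai bi na nb h heq ih =>
    rw [cancelLoop, dif_pos h, if_pos heq]
    rw [ih, List.drop_eq_getElem_cons h.1, List.drop_eq_getElem_cons h.2,
        heq, List.diff_cons, List.diff_cons, List.erase_cons_head, List.erase_cons_head]
  | case2 ai bi na nb h heq hgt ih =>
    rw [cancelLoop, dif_pos h, if_neg heq, if_pos hgt]
    rw [ih]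
    have hnm : lb[bi]'h.2 ∉ la.drop ai := not_mem_of_lt_head ha h.1 hgt
    simp only [Prod.mk.injEq]
    constructor
    · rw [List.drop_eq_getElem_cons h.2, List.diff_cons, List.erase_of_not_mem hnm]
    · rw [List.drop_eq_getElem_cons h.2 (l := lb), List.cons_diff_of_not_mem hnm,
          List.append_assoc, List.singleton_append]
  | case3 ai bi na nb h heq hgt ih =>
    rw [cancelLoop, dif_pos h, if_neg heq, if_neg hgt]
    rw [ih]
    have hlt : la[ai]'h.1 < lb[bi]'h.2 := by
      rcases lt_trichotomy (la[ai]'h.1) (lb[bi]'h.2) with hc | hc | hc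
      · exact hc
      · exact absurd hc heq
      · exact absurd hc hgt
    have hnm : la[ai]'h.1 ∉ lb.drop bi := not_mem_of_lt_head hb h.2 hlt
    simp only [Prod.mk.injEq]
    constructor
    · rw [List.drop_eq_getElem_cons h.1 (l := la), List.cons_diff_of_not_mem hnm,
          List.append_assoc, List.singleton_append]
    · rw [List.drop_eq_getElem_cons h.1, List.diff_cons, List.erase_of_not_mem hnm]
  | case4 ai bi na nb h =>
    rw [cancelLoop, dif_neg h]
    rcases not_and_or.mp h with h1 | h1 <;>
      · have : la.drop ai = [] ∨ lb.drop bi = [] := by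
          first
            | exact Or.inl (List.drop_eq_nil_of_le (by omega))
            | exact Or.inr (List.drop_eq_nil_of_le (by omega))
        rcases this with h2 | h2 <;> simp [h2]

theorem sorted_id_pairwise (xs : List Int) :
    (PySem.List.sorted xs (fun x => x)).Pairwise (· ≤ ·) :=
  PySem.List.sorted_pairwise xs (fun x => x)

-- ===== VERDICT (by name: the statement is the Claim_ definition above) =====
theorem cancel_common_factors_spec : Claim_equal_cancel_common_factors := by
  intro a b _
  show _ = _
  unfold cancel_common_factors cancel_common_factors_alt
  dsimp only
  rw [cancelLoop_diff _ _ _ _ _ _ (sorted_id_pairwise a) (sorted_id_pairwise b)]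
  rw [residualGo_diff _ _ _ _ (fun v => PySem.Dict.getD_counter _ v),
      residualGo_diff _ _ _ _ (fun v => PySem.Dict.getD_counter _ v)]
  simp
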